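-- pv_equiv track=rewrite | github.com/mwilco03/GPSBL | gipity_parse.py | get_column_boundaries
-- ===== SOURCE A (Python) =====
-- def get_column_boundaries(header):
--     """Identify the start and end positions of each column based on transitions in the header."""
--     boundaries = []
--     in_column = False
--     for idx, char in enumerate(header):
--         if char != ' ' and not in_column:
--             in_column = True
--             start = idx
--         elif char == ' ' and in_column:
--             in_column = False
--             boundaries.append((start, idx))
--     if in_column:
--         boundaries.append((start, len(header)))
--     return boundaries
-- ===== SOURCE B (Python) =====
-- import re
--
-- def get_column_boundaries(header):
--     """Identify the start and end positions of each column based on transitions in the header."""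
--     return [(m.start(), m.end()) for m in re.finditer(r'[^ ]+', header)]
-- ===== Notes on version B (the rewrite author's own statement) =====
-- stated objective: idiomatic
-- what changed: Replaces the explicit in_column state-machine loop with a single regex scan: each match of r'[^ ]+' is a maximal run of non-space characters, and its (start, end) span is exactly one boundary tuple; the scan runs in C instead of a per-character Python loop.
import Mathlib
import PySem

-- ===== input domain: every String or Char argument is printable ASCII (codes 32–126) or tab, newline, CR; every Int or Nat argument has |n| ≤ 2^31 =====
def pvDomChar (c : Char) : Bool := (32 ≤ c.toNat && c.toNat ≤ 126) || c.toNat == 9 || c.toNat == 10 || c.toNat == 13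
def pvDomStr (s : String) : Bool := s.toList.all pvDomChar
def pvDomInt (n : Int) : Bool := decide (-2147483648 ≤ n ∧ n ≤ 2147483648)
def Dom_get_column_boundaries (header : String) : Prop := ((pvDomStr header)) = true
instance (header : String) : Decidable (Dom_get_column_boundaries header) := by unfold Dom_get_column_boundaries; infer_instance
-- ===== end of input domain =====

-- B replaces A's explicit in_column state-machine with a regex-style scan for maximal
-- runs of non-space characters (idiomatic; same linear cost).

-- ===== PORT A =====
-- one loop iteration of A: state = (boundaries, in_column, start)
def pvStepA (st : List (Int × Int) × Bool × Int) (p : Int × Char) : List (Int × Int) × Bool × Int :=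
  if p.2 ≠ ' ' ∧ st.2.1 = false then (st.1, true, p.1)
  else if p.2 = ' ' ∧ st.2.1 = true then (st.1 ++ [(st.2.2, p.1)], false, st.2.2)
  else st

-- the trailing 'if in_column: boundaries.append((start, len(header)))'
def pvFinA (n : Int) (st : List (Int × Int) × Bool × Int) : List (Int × Int) :=
  if st.2.1 then st.1 ++ [(st.2.2, n)] else st.1

def get_column_boundaries (header : String) : List (Int × Int) :=
  pvFinA (header.toList.length : Int)
    ((PySem.List.enumerate header.toList 0).foldl pvStepA ([], false, 0))

-- ===== PORT B =====
-- the regex engine's scan for r'[^ ]+': pvSkipRun consumes the current match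
-- (returns the end position and the remaining text), pvFindRuns is finditer.
def pvSkipRun : List Char → Int → Int × List Char
  | [], i => (i, [])
  | c :: rest, i => if c = ' ' then (i, c :: rest) else pvSkipRun rest (i + 1)

theorem pvSkipRun_len : ∀ (cs : List Char) (i : Int), (pvSkipRun cs i).2.length ≤ cs.length := by
  intro cs
  induction cs with
  | nil => intro i; simp [pvSkipRun]
  | cons c rest ih =>
    intro i
    simp only [pvSkipRun]
    split
    · simp
    · exact le_trans (ih (i + 1)) (by simp)

def pvFindRuns : List Char → Int → List (Int × Int)
  | [], _ => []
  | c :: rest, i =>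
    if c = ' ' then pvFindRuns rest (i + 1)
    else (i, (pvSkipRun rest (i + 1)).1) ::
         pvFindRuns (pvSkipRun rest (i + 1)).2 (pvSkipRun rest (i + 1)).1
termination_by cs _ => cs.length
decreasing_by
  · simp
  · exact Nat.lt_succ_of_le (pvSkipRun_len _ _)

def get_column_boundaries_alt (header : String) : List (Int × Int) :=
  pvFindRuns header.toList 0

-- ===== PRECONDITION & SPEC =====
def Spec_get_column_boundaries (header : String) (out : List (Int × Int)) : Prop := out = get_column_boundaries_alt header
instance (header : String) (out : List (Int × Int)) : Decidable (Spec_get_column_boundaries header out) := by unfold Spec_get_column_boundaries; infer_instance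

-- ===== CLAIM (what is proved, stated in full; the proofs are below) =====
def Claim_equal_get_column_boundaries : Prop := ∀ (header : String), Dom_get_column_boundaries header → Spec_get_column_boundaries header (get_column_boundaries header)

-- ===== LEMMAS AND PROOFS =====

-- joint loop invariant: A's fold from index i, finished at i + |cs|, equals
-- (out of a column) the runs of cs, resp. (inside a column started at s) the
-- current run closed by pvSkipRun followed by the remaining runs.
theorem pvFold_inv : ∀ (cs : List Char),
    (∀ (i s : Int) (bs : List (Int × Int)),
      pvFinA (i + (cs.length : Int)) ((PySem.List.enumerate cs i).foldl pvStepA (bs, false, s))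
        = bs ++ pvFindRuns cs i)
    ∧
    (∀ (i s : Int) (bs : List (Int × Int)),
      pvFinA (i + (cs.length : Int)) ((PySem.List.enumerate cs i).foldl pvStepA (bs, true, s))
        = bs ++ (s, (pvSkipRun cs i).1) :: pvFindRuns (pvSkipRun cs i).2 (pvSkipRun cs i).1) := by
  intro cs
  induction cs with
  | nil =>
    constructor
    · intro i s bs; simp [PySem.List.enumerate, pvFinA, pvFindRuns]
    · intro i s bs; simp [PySem.List.enumerate, pvFinA, pvFindRuns, pvSkipRun]
  | cons c rest ih =>
    obtain ⟨ih1, ih2⟩ := ih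
    have hcast : ∀ i : Int, i + (((rest.length + 1 : Nat)) : Int) = i + 1 + (rest.length : Int) := by
      intro i; push_cast; ring
    constructor
    · intro i s bs
      rw [PySem.List.enumerate_cons]
      by_cases hc : c = ' '
      · have hs : pvStepA (bs, false, s) (i, c) = (bs, false, s) := by
          simp [pvStepA, hc]
        rw [List.foldl_cons, hs, List.length_cons, hcast, ih1 (i + 1) s bs]
        simp [pvFindRuns, hc]
      · have hs : pvStepA (bs, false, s) (i, c) = (bs, true, i) := by
          simp [pvStepA, hc]
        rw [List.foldl_cons, hs, List.length_cons, hcast, ih2 (i + 1) i bs]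
        simp [pvFindRuns, hc]
    · intro i s bs
      rw [PySem.List.enumerate_cons]
      by_cases hc : c = ' '
      · have hs : pvStepA (bs, true, s) (i, c) = (bs ++ [(s, i)], false, s) := by
          simp [pvStepA, hc]
        rw [List.foldl_cons, hs, List.length_cons, hcast, ih1 (i + 1) s (bs ++ [(s, i)])]
        simp [pvSkipRun, pvFindRuns, hc]
      · have hs : pvStepA (bs, true, s) (i, c) = (bs, true, s) := by
          simp [pvStepA, hc]
        rw [List.foldl_cons, hs, List.length_cons, hcast, ih2 (i + 1) s bs]
        simp [pvSkipRun, hc]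

-- ===== VERDICT (by name: the statement is the Claim_ definition above) =====
theorem get_column_boundaries_spec : Claim_equal_get_column_boundaries := by
  intro header _
  unfold Spec_get_column_boundaries get_column_boundaries get_column_boundaries_alt
  have := (pvFold_inv header.toList).1 0 0 []
  simpa using this
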